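-- pv_equiv track=rewrite | github.com/dinhhieudl/ai-pulse-2026 | backend/scrapers/vellum.py | _guess_provider
-- ===== SOURCE A (Python) =====
-- def _guess_provider(model: str) -> str:
--     m = model.lower()
--     if any(k in m for k in ["gpt", "o1", "o3", "o4"]):
--         return "OpenAI"
--     if any(k in m for k in ["claude"]):
--         return "Anthropic"
--     if any(k in m for k in ["gemini", "gemma"]):
--         return "Google"
--     if any(k in m for k in ["llama"]):
--         return "Meta"
--     if any(k in m for k in ["mistral", "mixtral"]):
--         return "Mistral AI"
--     if any(k in m for k in ["mimo"]):
--         return "Xiaomi"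
--     if any(k in m for k in ["grok"]):
--         return "xAI"
--     if any(k in m for k in ["deepseek"]):
--         return "DeepSeek"
--     if any(k in m for k in ["qwen"]):
--         return "Alibaba"
--     if any(k in m for k in ["command", "cohere"]):
--         return "Cohere"
--     return "Other"
-- ===== SOURCE B (Python) =====
-- _NAMES = ["OpenAI", "Anthropic", "Google", "Meta", "Mistral AI",
--           "Xiaomi", "xAI", "DeepSeek", "Alibaba", "Cohere", "Other"]
--
-- _KEYWORDS = {
--     "gpt": 0, "o1": 0, "o3": 0, "o4": 0,
--     "claude": 1,
--     "gemini": 2, "gemma": 2,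
--     "llama": 3,
--     "mistral": 4, "mixtral": 4,
--     "mimo": 5,
--     "grok": 6,
--     "deepseek": 7,
--     "qwen": 8,
--     "command": 9, "cohere": 9,
-- }
--
-- def _guess_provider(model: str) -> str:
--     # Single left-to-right scan of the lowercased model: at each position, look up
--     # every candidate-length substring in a keyword->priority hash table and keep
--     # the minimum priority matched; the name table resolves the answer at the end.
--     m = model.lower()
--     best = 10
--     for i in range(len(m)):
--         for L in (2, 3, 4, 5, 6, 7, 8):
--             p = _KEYWORDS.get(m[i:i+L])
--             if p is not None and p < best:
--                 best = p
--     return _NAMES[best]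
-- ===== Notes on version B (the rewrite author's own statement) =====
-- stated objective: alternative
-- what changed: Instead of testing each provider's keywords against the model with ten successive substring searches, B makes a single left-to-right scan over the lowercased model, hashing every candidate-length substring at each position into a keyword->priority dictionary and keeping the minimum priority matched, which a name table resolves at the end.
import Mathlib
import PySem

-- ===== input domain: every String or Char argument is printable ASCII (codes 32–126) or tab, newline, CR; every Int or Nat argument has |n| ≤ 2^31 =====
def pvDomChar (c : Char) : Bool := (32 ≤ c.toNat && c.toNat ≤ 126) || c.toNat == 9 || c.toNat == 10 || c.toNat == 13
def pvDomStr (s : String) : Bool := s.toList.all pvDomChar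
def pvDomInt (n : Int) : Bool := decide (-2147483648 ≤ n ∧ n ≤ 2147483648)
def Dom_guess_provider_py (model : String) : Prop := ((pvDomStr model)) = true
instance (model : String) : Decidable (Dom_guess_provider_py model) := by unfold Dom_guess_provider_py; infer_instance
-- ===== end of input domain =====

-- B replaces A's ten-branch keyword-ladder by a single left-to-right scan of the lowercased
-- model that hashes each candidate-length substring into a keyword->priority table, keeping
-- the minimum priority (simpler data-driven scan; same result).


-- ===== PORT A =====
def guess_provider_py (model : String) : String :=
  let m := PySem.Str.lower model
  if (["gpt", "o1", "o3", "o4"] : List String).any (fun k => PySem.Str.isIn k m) then "OpenAI"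
  else if (["claude"] : List String).any (fun k => PySem.Str.isIn k m) then "Anthropic"
  else if (["gemini", "gemma"] : List String).any (fun k => PySem.Str.isIn k m) then "Google"
  else if (["llama"] : List String).any (fun k => PySem.Str.isIn k m) then "Meta"
  else if (["mistral", "mixtral"] : List String).any (fun k => PySem.Str.isIn k m) then "Mistral AI"
  else if (["mimo"] : List String).any (fun k => PySem.Str.isIn k m) then "Xiaomi"
  else if (["grok"] : List String).any (fun k => PySem.Str.isIn k m) then "xAI"
  else if (["deepseek"] : List String).any (fun k => PySem.Str.isIn k m) then "DeepSeek"
  else if (["qwen"] : List String).any (fun k => PySem.Str.isIn k m) then "Alibaba"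
  else if (["command", "cohere"] : List String).any (fun k => PySem.Str.isIn k m) then "Cohere"
  else "Other"

-- ===== PORT B =====
def pvNames : List String :=
  ["OpenAI", "Anthropic", "Google", "Meta", "Mistral AI",
   "Xiaomi", "xAI", "DeepSeek", "Alibaba", "Cohere", "Other"]

def pvKw : PySem.Dict String Int :=
  PySem.Dict.ofList
    [("gpt", 0), ("o1", 0), ("o3", 0), ("o4", 0),
     ("claude", 1),
     ("gemini", 2), ("gemma", 2),
     ("llama", 3),
     ("mistral", 4), ("mixtral", 4),
     ("mimo", 5),
     ("grok", 6),
     ("deepseek", 7),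
     ("qwen", 8),
     ("command", 9), ("cohere", 9)]

def guess_provider_py_alt (model : String) : String :=
  let m := PySem.Str.lower model
  let best := (PySem.List.pyRange 0 (PySem.Str.len m) 1).foldl (fun best i =>
    ([2, 3, 4, 5, 6, 7, 8] : List Int).foldl (fun best L =>
      match PySem.Dict.get? pvKw (PySem.Str.slice m (some i) (some (i + L))) with
      | some p => if p < best then p else best
      | none => best) best) 10
  -- best is always in [0, 10], so _NAMES[best] never raises; getD's default is dead code
  (PySem.List.pyGet? pvNames best).getD "Other"

-- ===== PRECONDITION & SPEC =====
def Spec_guess_provider_py (model : String) (out : String) : Prop := out = guess_provider_py_alt model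
instance (model : String) (out : String) : Decidable (Spec_guess_provider_py model out) := by
  unfold Spec_guess_provider_py; infer_instance

-- ===== CLAIM =====
def Claim_equal_guess_provider_py : Prop :=
  ∀ (model : String), Dom_guess_provider_py model → Spec_guess_provider_py model (guess_provider_py model)

-- ===== LEMMAS AND PROOFS =====

-- B's fold, named for the proofs (definitionally the fold inside guess_provider_py_alt).
def pvBest (m : String) : Int :=
  (PySem.List.pyRange 0 (PySem.Str.len m) 1).foldl (fun best i =>
    ([2, 3, 4, 5, 6, 7, 8] : List Int).foldl (fun best L =>
      match PySem.Dict.get? pvKw (PySem.Str.slice m (some i) (some (i + L))) with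
      | some p => if p < best then p else best
      | none => best) best) 10

-- A's keyword group for each priority, and "some keyword of group p occurs in m".
def pvGrp (p : Int) : List String :=
  if p = 0 then ["gpt", "o1", "o3", "o4"]
  else if p = 1 then ["claude"]
  else if p = 2 then ["gemini", "gemma"]
  else if p = 3 then ["llama"]
  else if p = 4 then ["mistral", "mixtral"]
  else if p = 5 then ["mimo"]
  else if p = 6 then ["grok"]
  else if p = 7 then ["deepseek"]
  else if p = 8 then ["qwen"]
  else if p = 9 then ["command", "cohere"]
  else []

def pvOcc (p : Int) (m : String) : Bool := (pvGrp p).any (fun k => PySem.Str.isIn k m)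

-- all priorities hit during B's scan
def pvCands (m : String) : List Int :=
  (PySem.List.pyRange 0 (PySem.Str.len m) 1).flatMap (fun i =>
    ([2, 3, 4, 5, 6, 7, 8] : List Int).filterMap (fun L =>
      PySem.Dict.get? pvKw (PySem.Str.slice m (some i) (some (i + L)))))

-- generic min-fold facts
lemma pvFoldMin_le_init (cs : List Int) (b : Int) :
    cs.foldl (fun b c => if c < b then c else b) b ≤ b := by
  induction cs generalizing b with
  | nil => simp
  | cons c cs ih =>
    simp only [List.foldl_cons]
    split_ifs with h
    · exact le_trans (ih c) (le_of_lt h)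
    · exact ih b

lemma pvFoldMin_le_mem {cs : List Int} {c : Int} (hc : c ∈ cs) (b : Int) :
    cs.foldl (fun b c => if c < b then c else b) b ≤ c := by
  induction cs generalizing b with
  | nil => cases hc
  | cons d cs ih =>
    simp only [List.foldl_cons]
    rcases List.mem_cons.mp hc with h | h
    · subst h
      split_ifs with h'
      · exact pvFoldMin_le_init cs c
      · exact le_trans (pvFoldMin_le_init cs b) (le_of_not_gt h')
    · exact ih h _

lemma pvFoldMin_cases (cs : List Int) (b : Int) :
    cs.foldl (fun b c => if c < b then c else b) b = b ∨
      cs.foldl (fun b c => if c < b then c else b) b ∈ cs := by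
  induction cs generalizing b with
  | nil => simp
  | cons c cs ih =>
    simp only [List.foldl_cons]
    split_ifs with h
    · rcases ih c with h' | h'
      · exact Or.inr (by simp [h'])
      · exact Or.inr (List.mem_cons_of_mem _ h')
    · rcases ih b with h' | h'
      · exact Or.inl h'
      · exact Or.inr (List.mem_cons_of_mem _ h')

-- the inner fold is a min-fold over the filterMapped lookups
lemma pvInner_eq {α : Type} (f : α → Option Int) (xs : List α) (b : Int) :
    xs.foldl (fun b x =>
        match f x with
        | some p => if p < b then p else b
        | none => b) b
      = (xs.filterMap f).foldl (fun b c => if c < b then c else b) b := by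
  induction xs generalizing b with
  | nil => simp
  | cons x xs ih =>
    simp only [List.foldl_cons, List.filterMap_cons]
    cases h : f x with
    | none => simp [ih]
    | some p => simp [ih]

lemma pvBest_eq_fold_aux (m : String) (idxs : List Int) (b : Int) :
    idxs.foldl (fun best i =>
        ([2, 3, 4, 5, 6, 7, 8] : List Int).foldl (fun best L =>
          match PySem.Dict.get? pvKw (PySem.Str.slice m (some i) (some (i + L))) with
          | some p => if p < best then p else best
          | none => best) best) b
      = (idxs.flatMap (fun i => ([2, 3, 4, 5, 6, 7, 8] : List Int).filterMap (fun L =>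
          PySem.Dict.get? pvKw (PySem.Str.slice m (some i) (some (i + L)))))).foldl
            (fun b c => if c < b then c else b) b := by
  induction idxs generalizing b with
  | nil => simp
  | cons i idxs ih =>
    rw [List.flatMap_cons, List.foldl_append, List.foldl_cons, pvInner_eq, ih]

lemma pvBest_eq_fold (m : String) :
    pvBest m = (pvCands m).foldl (fun b c => if c < b then c else b) 10 := by
  unfold pvBest pvCands
  exact pvBest_eq_fold_aux m _ 10

-- the keyword dictionary, characterised
set_option maxHeartbeats 1000000 in
lemma pvKw_items : pvKw = ⟨[("gpt", 0), ("o1", 0), ("o3", 0), ("o4", 0), ("claude", 1),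
    ("gemini", 2), ("gemma", 2), ("llama", 3), ("mistral", 4), ("mixtral", 4), ("mimo", 5),
    ("grok", 6), ("deepseek", 7), ("qwen", 8), ("command", 9), ("cohere", 9)]⟩ := by decide

lemma pvLookup_some {s : String} {p : Int} (h : PySem.Dict.get? pvKw s = some p) :
    0 ≤ p ∧ p < 10 ∧ s ∈ pvGrp p := by
  have hmem := (PySem.Dict.get?_eq_some_iff_mem_items pvKw s p (by decide)).mp h
  rw [pvKw_items] at hmem
  simp only [List.mem_cons, List.not_mem_nil, or_false, Prod.mk.injEq] at hmem
  rcases hmem with ⟨rfl, rfl⟩ | ⟨rfl, rfl⟩ | ⟨rfl, rfl⟩ | ⟨rfl, rfl⟩ | ⟨rfl, rfl⟩ | ⟨rfl, rfl⟩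
    | ⟨rfl, rfl⟩ | ⟨rfl, rfl⟩ | ⟨rfl, rfl⟩ | ⟨rfl, rfl⟩ | ⟨rfl, rfl⟩ | ⟨rfl, rfl⟩ | ⟨rfl, rfl⟩
    | ⟨rfl, rfl⟩ | ⟨rfl, rfl⟩ | ⟨rfl, rfl⟩ <;> exact ⟨by norm_num, by norm_num, by decide⟩

lemma pvGrp_lookup {p : Int} (hp0 : 0 ≤ p) (hp1 : p < 10) {k : String} (hk : k ∈ pvGrp p) :
    PySem.Dict.get? pvKw k = some p ∧ (k.toList.length : Int) ∈ ([2, 3, 4, 5, 6, 7, 8] : List Int)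
      ∧ k.toList ≠ [] := by
  interval_cases p <;> simp [pvGrp] at hk <;>
    rcases hk with rfl | rfl | rfl | rfl <;> exact ⟨by decide, by decide, by decide⟩

-- occurrence of a keyword of priority p  ↔  p turns up in B's scan
lemma pvMem_cands_of_occ {p : Int} (hp0 : 0 ≤ p) (hp1 : p < 10) {m : String}
    (h : pvOcc p m = true) : p ∈ pvCands m := by
  obtain ⟨k, hkmem, hkin⟩ := List.any_eq_true.mp h
  obtain ⟨hlook, hlen, hne⟩ := pvGrp_lookup hp0 hp1 hkmem
  -- k occurs in m: get a starting position j
  rw [PySem.Str.isIn_eq] at hkin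
  obtain ⟨j, hpref⟩ := (PySem.Chars.exists_prefix_drop_iff_isIn k.toList m.toList).mpr hkin
  have hj : j < m.toList.length := by
    by_contra hge
    rw [List.drop_eq_nil_of_le (le_of_not_gt hge)] at hpref
    exact hne (List.prefix_nil.mp hpref)
  refine List.mem_flatMap.mpr ⟨(j : Int), ?_, List.mem_filterMap.mpr
    ⟨(k.toList.length : Int), hlen, ?_⟩⟩
  · rw [PySem.List.mem_pyRange_iff_of_pos (by norm_num)]
    refine ⟨by positivity, ?_, ⟨j, by ring⟩⟩
    rw [PySem.Str.len_eq]; exact_mod_cast hj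
  · have hsl : (PySem.Str.slice m (some (j : Int)) (some ((j : Int) + (k.toList.length : Int)))).toList
        = k.toList := by
      rw [PySem.Str.toList_slice, PySem.Chars.slice_eq_listSlice, PySem.List.slice_natCast_add]
      exact (List.prefix_iff_eq_take.mp hpref).symm
    rw [String.toList_inj.mp hsl]
    exact hlook

lemma pvOcc_of_mem_cands {c : Int} {m : String} (hc : c ∈ pvCands m) :
    0 ≤ c ∧ c < 10 ∧ pvOcc c m = true := by
  obtain ⟨i, hi, hcf⟩ := List.mem_flatMap.mp hc
  obtain ⟨L, hL, hlook⟩ := List.mem_filterMap.mp hcf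
  obtain ⟨hc0, hc1, hmem⟩ := pvLookup_some hlook
  refine ⟨hc0, hc1, List.any_eq_true.mpr ⟨_, hmem, ?_⟩⟩
  -- the matched key is a slice of m, hence an infix, hence isIn
  have hi0 : (0 : Int) ≤ i := ((PySem.List.mem_pyRange_iff_of_pos (by norm_num) i).mp hi).1
  have hL0 : (0 : Int) ≤ L := by
    simp only [List.mem_cons, List.not_mem_nil, or_false] at hL
    rcases hL with rfl | rfl | rfl | rfl | rfl | rfl | rfl <;> norm_num
  rw [PySem.Str.isIn_eq, PySem.Chars.isIn_iff_infix, PySem.Str.toList_slice,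
    PySem.Chars.slice_eq_listSlice, PySem.List.slice_toNat m.toList hi0 (by omega)]
  exact ((List.take_prefix _ _).isInfix).trans (List.drop_suffix _ _).isInfix

lemma pvBest_le {p : Int} (hp0 : 0 ≤ p) (hp1 : p < 10) {m : String} (h : pvOcc p m = true) :
    pvBest m ≤ p := by
  rw [pvBest_eq_fold]
  exact pvFoldMin_le_mem (pvMem_cands_of_occ hp0 hp1 h) 10

lemma pvBest_cases (m : String) :
    pvBest m = 10 ∨ (0 ≤ pvBest m ∧ pvBest m < 10 ∧ pvOcc (pvBest m) m = true) := by
  rw [pvBest_eq_fold]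
  rcases pvFoldMin_cases (pvCands m) 10 with h | h
  · exact Or.inl h
  · exact Or.inr (pvOcc_of_mem_cands h)

lemma pvBest_eq {p : Int} (hp0 : 0 ≤ p) (hp1 : p < 10) {m : String} (hocc : pvOcc p m = true)
    (hlow : ∀ q, 0 ≤ q → q < p → pvOcc q m = false) : pvBest m = p := by
  have hle := pvBest_le hp0 hp1 hocc
  rcases pvBest_cases m with h | ⟨h0, _, hboc⟩
  · omega
  · by_contra hne
    have : pvBest m < p := lt_of_le_of_ne hle hne
    rw [hlow _ h0 this] at hboc
    exact Bool.noConfusion hboc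

lemma pvBest_eq_ten {m : String} (hlow : ∀ q, 0 ≤ q → q < 10 → pvOcc q m = false) :
    pvBest m = 10 := by
  rcases pvBest_cases m with h | ⟨h0, h1, hboc⟩
  · exact h
  · rw [hlow _ h0 h1] at hboc
    exact Bool.noConfusion hboc

lemma pvAlt_eq (model : String) :
    guess_provider_py_alt model
      = (PySem.List.pyGet? pvNames (pvBest (PySem.Str.lower model))).getD "Other" := rfl

-- ===== VERDICT =====
theorem guess_provider_py_spec : Claim_equal_guess_provider_py := by
  intro model _
  unfold Spec_guess_provider_py
  rw [pvAlt_eq]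
  simp only [guess_provider_py]
  split_ifs with h0 h1 h2 h3 h4 h5 h6 h7 h8 h9
  · rw [pvBest_eq (by norm_num) (by norm_num) (p := 0)
      (by simpa [pvOcc, pvGrp] using h0)
      (fun q hq hq' => absurd hq' (by omega))]
    decide
  · rw [pvBest_eq (by norm_num) (by norm_num) (p := 1)
      (by simpa [pvOcc, pvGrp] using h1)
      (fun q hq hq' => by interval_cases q; simp_all [pvOcc, pvGrp])]
    decide
  · rw [pvBest_eq (by norm_num) (by norm_num) (p := 2)
      (by simpa [pvOcc, pvGrp] using h2)
      (fun q hq hq' => by interval_cases q <;> simp_all [pvOcc, pvGrp])]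
    decide
  · rw [pvBest_eq (by norm_num) (by norm_num) (p := 3)
      (by simpa [pvOcc, pvGrp] using h3)
      (fun q hq hq' => by interval_cases q <;> simp_all [pvOcc, pvGrp])]
    decide
  · rw [pvBest_eq (by norm_num) (by norm_num) (p := 4)
      (by simpa [pvOcc, pvGrp] using h4)
      (fun q hq hq' => by interval_cases q <;> simp_all [pvOcc, pvGrp])]
    decide
  · rw [pvBest_eq (by norm_num) (by norm_num) (p := 5)
      (by simpa [pvOcc, pvGrp] using h5)
      (fun q hq hq' => by interval_cases q <;> simp_all [pvOcc, pvGrp])]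
    decide
  · rw [pvBest_eq (by norm_num) (by norm_num) (p := 6)
      (by simpa [pvOcc, pvGrp] using h6)
      (fun q hq hq' => by interval_cases q <;> simp_all [pvOcc, pvGrp])]
    decide
  · rw [pvBest_eq (by norm_num) (by norm_num) (p := 7)
      (by simpa [pvOcc, pvGrp] using h7)
      (fun q hq hq' => by interval_cases q <;> simp_all [pvOcc, pvGrp])]
    decide
  · rw [pvBest_eq (by norm_num) (by norm_num) (p := 8)
      (by simpa [pvOcc, pvGrp] using h8)
      (fun q hq hq' => by interval_cases q <;> simp_all [pvOcc, pvGrp])]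
    decide
  · rw [pvBest_eq (by norm_num) (by norm_num) (p := 9)
      (by simpa [pvOcc, pvGrp] using h9)
      (fun q hq hq' => by interval_cases q <;> simp_all [pvOcc, pvGrp])]
    decide
  · rw [pvBest_eq_ten
      (fun q hq hq' => by interval_cases q <;> simp_all [pvOcc, pvGrp])]
    decide
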